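-- pv_equiv track=rewrite | github.com/KAKA-kw/Algorithm-challenge | sumin/6주차/bj_(2234)성곽.py | find_direction
-- ===== SOURCE A (Python) =====
-- def find_direction(x):
--     values = [1, 2, 4, 8]
--     directions = [1, 0, 3, 2]
--     answer = []
--     for i in range(2**len(values)):
--         # i를 j 만큼 오른쪽으로 시프트하고, & 1은 오른쪽에서 첫 번째 비트를 가져옴
--         value = [values[j] for j in range(len(values)) if (i >> j) & 1]
--         direction = [directions[j] for j in range(len(values)) if (i >> j) & 1]
--         if sum(value) == x:
--             return [d for d in directions if d not in direction]
-- ===== SOURCE B (Python) =====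
-- def find_direction(x):
--     rem = x
--     present = []
--     for power, d in [(8, 2), (4, 3), (2, 0), (1, 1)]:
--         if power <= rem:
--             rem -= power
--             present.append(d)
--     if rem != 0:
--         return None
--     return [d for d in [1, 0, 3, 2] if d not in present]
-- ===== Notes on version B (the rewrite author's own statement) =====
-- stated objective: simpler
-- what changed: Replaces the 16-subset enumeration (testing each subset's sum against x) by one greedy pass that decomposes x by subtracting the powers 8,4,2,1, returning None if a nonzero remainder is left.
import Mathlib
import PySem

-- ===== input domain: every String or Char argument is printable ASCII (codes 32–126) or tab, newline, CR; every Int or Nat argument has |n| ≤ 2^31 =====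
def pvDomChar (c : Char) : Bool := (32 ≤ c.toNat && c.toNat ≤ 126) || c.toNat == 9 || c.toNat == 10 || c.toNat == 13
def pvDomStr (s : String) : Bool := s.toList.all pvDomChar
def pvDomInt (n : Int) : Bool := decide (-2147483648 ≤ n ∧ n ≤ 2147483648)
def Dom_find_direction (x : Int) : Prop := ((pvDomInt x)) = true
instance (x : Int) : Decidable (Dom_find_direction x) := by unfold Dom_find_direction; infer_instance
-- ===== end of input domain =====

-- B replaces A's enumeration of all 16 subsets of [1,2,4,8] by a single greedy
-- decomposition of x (subtract powers 8,4,2,1 when they fit); objective: simpler.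


-- ===== PORT A =====
-- (i >> j) & 1 for the loop counter i; exact, since i ranges over range(16) (nonnegative)
def pvBit (i j : Nat) : Bool := ((i >>> j) &&& 1) == 1

-- the body of A's for-loop with early return, walking the remaining loop counters
def fdLoop (x : Int) : List Nat → Option (List Int)
  | [] => none
  | i :: rest =>
    let value := ((List.range 4).filter (fun j => pvBit i j)).map
      (fun j => ([1, 2, 4, 8] : List Int).getD j 0)
    let direction := ((List.range 4).filter (fun j => pvBit i j)).map
      (fun j => ([1, 0, 3, 2] : List Int).getD j 0)
    if value.foldl (· + ·) 0 = x then
      some (([1, 0, 3, 2] : List Int).filter (fun d => !direction.contains d))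
    else fdLoop x rest

def find_direction (x : Int) : Option (List Int) :=
  fdLoop x (List.range 16)

-- ===== PORT B =====
def find_direction_alt (x : Int) : Option (List Int) :=
  let st := ([(8, 2), (4, 3), (2, 0), (1, 1)] : List (Int × Int)).foldl
    (fun (st : Int × List Int) pd =>
      if pd.1 ≤ st.1 then (st.1 - pd.1, st.2 ++ [pd.2]) else st) (x, [])
  if st.1 ≠ 0 then none
  else some (([1, 0, 3, 2] : List Int).filter (fun d => !st.2.contains d))

-- ===== PRECONDITION & SPEC =====
def Spec_find_direction (x : Int) (out : Option (List Int)) : Prop := out = find_direction_alt x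
instance (x : Int) (out : Option (List Int)) : Decidable (Spec_find_direction x out) := by unfold Spec_find_direction; infer_instance

-- ===== CLAIM (what is proved, stated in full; the proofs are below) =====
def Claim_equal_find_direction : Prop := ∀ (x : Int), Dom_find_direction x → Spec_find_direction x (find_direction x)

-- ===== LEMMAS AND PROOFS =====
-- the subset sum A's loop tests at counter i
def fdSum (i : Nat) : Int :=
  (((List.range 4).filter (fun j => pvBit i j)).map
      (fun j => ([1, 2, 4, 8] : List Int).getD j 0)).foldl (· + ·) 0

lemma fdLoop_none (x : Int) (l : List Nat) (h : ∀ i ∈ l, fdSum i ≠ x) :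
    fdLoop x l = none := by
  induction l with
  | nil => rfl
  | cons i rest ih =>
    show (if fdSum i = x then _ else fdLoop x rest) = none
    rw [if_neg (h i (List.mem_cons_self ..))]
    exact ih fun j hj => h j (List.mem_cons_of_mem _ hj)

lemma fdSum_bounds : ∀ i ∈ List.range 16, 0 ≤ fdSum i ∧ fdSum i ≤ 15 := by decide

lemma fd_out_of_range (x : Int) (h : x < 0 ∨ 15 < x) :
    find_direction x = none ∧ find_direction_alt x = none := by
  constructor
  · exact fdLoop_none x _ fun i hi => by
      have := fdSum_bounds i hi; omega
  · simp only [find_direction_alt, List.foldl]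
    split_ifs <;> first | rfl | omega

-- ===== VERDICT (by name: the statement is the Claim_ definition above) =====
theorem find_direction_spec : Claim_equal_find_direction := by
  intro x _
  unfold Spec_find_direction
  by_cases h : 0 ≤ x ∧ x ≤ 15
  · obtain ⟨h1, h2⟩ := h
    interval_cases x <;> decide
  · obtain ⟨hA, hB⟩ := fd_out_of_range x (by omega)
    rw [hA, hB]
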